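-- pv_equiv track=rewrite | github.com/dhcai21/VReassort | src/identify_processing.py | subclade
-- ===== SOURCE A (Python) =====
-- def subclade(all_clade,clade2):
--     res = []
--     for i in range(len(all_clade)):
--         flag = 0
--         for j in range(len(clade2)):
--             c1 = all_clade[i]
--             c2 = clade2[j]
--             if len(c1) > len(c2): # not include the reassorted one
--                 continue
--             share = set(c1).intersection(set(c2))
--             if len(share) == len(c1):
--                 flag = 1
--         if flag == 0:
--             res.append(i)
--     return res
-- ===== SOURCE B (Python) =====
-- def subclade(all_clade, clade2):
--     # inverted index: element -> list of indices j of clade2 whose set contains it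
--     idx = {}
--     for j in range(len(clade2)):
--         for e in set(clade2[j]):
--             idx.setdefault(e, []).append(j)
--     res = []
--     for i in range(len(all_clade)):
--         c1 = all_clade[i]
--         k = len(c1)
--         # cnt[j] = |set(c1) & set(clade2[j])|
--         cnt = dict.fromkeys(range(len(clade2)), 0)
--         for e in set(c1):
--             for j in idx.get(e, ()):
--                 cnt[j] += 1
--         if not any(cnt[j] == k and len(clade2[j]) >= k for j in cnt):
--             res.append(i)
--     return res
-- ===== Notes on version B (the rewrite author's own statement) =====
-- stated objective: faster
-- what changed: Replaces the nested per-pair subset rescans (rebuilding set(c1)/set(c2) for every i,j pair) by a one-pass inverted index element->clade2 indices plus a per-clade match counter, so coverage of each clade is decided from counts without any per-pair set construction.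
import Mathlib
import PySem

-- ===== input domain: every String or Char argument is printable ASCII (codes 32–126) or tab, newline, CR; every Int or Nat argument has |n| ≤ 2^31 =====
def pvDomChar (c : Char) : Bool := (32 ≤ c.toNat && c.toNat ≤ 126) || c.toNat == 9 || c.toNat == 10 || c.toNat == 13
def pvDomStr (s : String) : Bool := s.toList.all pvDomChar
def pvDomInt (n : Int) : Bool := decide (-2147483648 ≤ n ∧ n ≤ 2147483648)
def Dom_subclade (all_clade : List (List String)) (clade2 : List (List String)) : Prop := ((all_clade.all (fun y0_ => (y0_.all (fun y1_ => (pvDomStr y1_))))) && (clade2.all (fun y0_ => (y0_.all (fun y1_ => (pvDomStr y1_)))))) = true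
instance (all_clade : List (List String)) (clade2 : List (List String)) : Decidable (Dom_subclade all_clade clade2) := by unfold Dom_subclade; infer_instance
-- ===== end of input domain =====

-- B replaces A's per-pair subset rescans by a one-pass inverted index (element -> clade2 indices)
-- plus per-clade intersection counters; the return values are proved equal on every input.

-- ===== PORT A =====
def subclade (all_clade : List (List String)) (clade2 : List (List String)) : List Int :=
  (PySem.List.pyRange 0 (PySem.List.len all_clade) 1).foldl (fun res i =>
    let flag : Int :=
      (PySem.List.pyRange 0 (PySem.List.len clade2) 1).foldl (fun flag j =>
        let c1 := PySem.List.pyGetD all_clade i []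
        let c2 := PySem.List.pyGetD clade2 j []
        if PySem.List.len c1 > PySem.List.len c2 then flag   -- continue
        else
          let share := PySem.Set.inter (PySem.Set.ofList c1) (PySem.Set.ofList c2)
          if PySem.Set.len share == PySem.List.len c1 then 1 else flag) 0
    if flag == 0 then res ++ [i] else res) []

-- ===== PORT B =====
-- idx.setdefault(e, []).append(j) mutates the stored list in place; as a value this is
-- exactly Dict.modify e [] (· ++ [j]).  cnt[j] += 1 (j always a key) is Dict.modify j 0 (· + 1).
def subclade_alt (all_clade : List (List String)) (clade2 : List (List String)) : List Int :=
  let idx : PySem.Dict String (List Int) :=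
    (PySem.List.pyRange 0 (PySem.List.len clade2) 1).foldl (fun idx j =>
      (PySem.Set.ofList (PySem.List.pyGetD clade2 j [])).foldl (fun idx e =>
        idx.modify e [] (fun l => l ++ [j])) idx) PySem.Dict.empty
  (PySem.List.pyRange 0 (PySem.List.len all_clade) 1).foldl (fun res i =>
    let c1 := PySem.List.pyGetD all_clade i []
    let k := PySem.List.len c1
    let cnt0 : PySem.Dict Int Int :=
      (PySem.List.pyRange 0 (PySem.List.len clade2) 1).foldl (fun d j => d.insert j 0) PySem.Dict.empty
    let cnt :=
      (PySem.Set.ofList c1).foldl (fun cnt e =>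
        (idx.getD e []).foldl (fun cnt j => cnt.modify j 0 (fun v => v + 1)) cnt) cnt0
    if cnt.keys.any (fun j =>
        (cnt.getD j 0 == k) && decide (PySem.List.len (PySem.List.pyGetD clade2 j []) ≥ k)) then res
    else res ++ [i]) []

-- ===== PRECONDITION & SPEC =====
def Spec_subclade (all_clade : List (List String)) (clade2 : List (List String)) (out : List Int) : Prop := out = subclade_alt all_clade clade2
instance (all_clade : List (List String)) (clade2 : List (List String)) (out : List Int) : Decidable (Spec_subclade all_clade clade2 out) := by unfold Spec_subclade; infer_instance

-- ===== CLAIM (what is proved, stated in full; the proofs are below) =====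
def Claim_equal_subclade : Prop := ∀ (all_clade : List (List String)) (clade2 : List (List String)), Dom_subclade all_clade clade2 → Spec_subclade all_clade clade2 (subclade all_clade clade2)

-- ===== LEMMAS AND PROOFS =====

-- the common content of both loops: clade c1 is covered iff some clade2[j] is at least as long
-- and shares len(c1) distinct elements with it
def pvCovered (clade2 : List (List String)) (c1 : List String) : Bool :=
  (PySem.List.pyRange 0 (PySem.List.len clade2) 1).any (fun j =>
    !(decide (PySem.List.len c1 > PySem.List.len (PySem.List.pyGetD clade2 j []))) &&
      (PySem.Set.len (PySem.Set.inter (PySem.Set.ofList c1) (PySem.Set.ofList (PySem.List.pyGetD clade2 j []))) == PySem.List.len c1))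

-- A's inner flag loop is an "any"
theorem pv_flag_fold (l : List Int) (p : Int → Bool) (init : Int) :
    l.foldl (fun fl j => if p j then 1 else fl) init = if l.any p then 1 else init := by
  induction l generalizing init with
  | nil => simp
  | cons a l ih =>
    simp only [List.foldl_cons, List.any_cons]
    rw [ih]
    by_cases h1 : p a = true <;> by_cases h2 : l.any p = true <;> simp [h1, h2]

-- any only looks at members
theorem pv_any_congr_mem {α : Type} (l : List α) (p q : α → Bool)
    (h : ∀ x ∈ l, p x = q x) : l.any p = l.any q := by
  induction l with
  | nil => rfl
  | cons a l ih =>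
    simp only [List.any_cons, h a (by simp), ih (fun x hx => h x (by simp [hx]))]

-- A = filter by not-covered
theorem pv_subclade_eq_filter (all_clade clade2 : List (List String)) :
    subclade all_clade clade2 =
      (PySem.List.pyRange 0 (PySem.List.len all_clade) 1).filter
        (fun i => !pvCovered clade2 (PySem.List.pyGetD all_clade i [])) := by
  unfold subclade
  have hfun : (fun (res : List Int) (i : Int) =>
      let flag : Int :=
        (PySem.List.pyRange 0 (PySem.List.len clade2) 1).foldl (fun flag j =>
          let c1 := PySem.List.pyGetD all_clade i []
          let c2 := PySem.List.pyGetD clade2 j []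
          if PySem.List.len c1 > PySem.List.len c2 then flag
          else
            let share := PySem.Set.inter (PySem.Set.ofList c1) (PySem.Set.ofList c2)
            if PySem.Set.len share == PySem.List.len c1 then 1 else flag) 0
      if flag == 0 then res ++ [i] else res)
      = (fun res i => if (fun i => !pvCovered clade2 (PySem.List.pyGetD all_clade i [])) i then res ++ [i] else res) := by
    funext res i
    show (if _ == (0:Int) then res ++ [i] else res) = _
    have hstep : (fun (flag j : Int) =>
        let c1 := PySem.List.pyGetD all_clade i []
        let c2 := PySem.List.pyGetD clade2 j []
        if PySem.List.len c1 > PySem.List.len c2 then flag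
        else
          let share := PySem.Set.inter (PySem.Set.ofList c1) (PySem.Set.ofList c2)
          if PySem.Set.len share == PySem.List.len c1 then 1 else flag)
        = (fun flag j =>
            if ((fun j => !(decide (PySem.List.len (PySem.List.pyGetD all_clade i []) > PySem.List.len (PySem.List.pyGetD clade2 j []))) &&
              (PySem.Set.len (PySem.Set.inter (PySem.Set.ofList (PySem.List.pyGetD all_clade i [])) (PySem.Set.ofList (PySem.List.pyGetD clade2 j []))) == PySem.List.len (PySem.List.pyGetD all_clade i []))) j)
            then 1 else flag) := by
      funext flag j
      by_cases h1 : (PySem.List.pyGetD clade2 j []).length < (PySem.List.pyGetD all_clade i []).length <;>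
        simp [h1]
    rw [hstep, pv_flag_fold]
    have hc : ((PySem.List.pyRange 0 (PySem.List.len clade2) 1).any (fun j =>
        !(decide (PySem.List.len (PySem.List.pyGetD all_clade i []) > PySem.List.len (PySem.List.pyGetD clade2 j []))) &&
        (PySem.Set.len (PySem.Set.inter (PySem.Set.ofList (PySem.List.pyGetD all_clade i [])) (PySem.Set.ofList (PySem.List.pyGetD clade2 j []))) == PySem.List.len (PySem.List.pyGetD all_clade i []))))
        = pvCovered clade2 (PySem.List.pyGetD all_clade i []) := rfl
    rw [hc]
    cases h : pvCovered clade2 (PySem.List.pyGetD all_clade i []) <;> simp [h]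
  rw [hfun]
  have h2 := PySem.List.foldl_append_if (fun i => !pvCovered clade2 (PySem.List.pyGetD all_clade i []))
      (fun i : Int => i) (PySem.List.pyRange 0 (PySem.List.len all_clade) 1) []
  simpa using h2

-- inverted-index build: one step over one clade's distinct elements
theorem pv_inner_step (s : List String) (hs : s.Nodup) (j : Int) (d : PySem.Dict String (List Int)) (e : String) :
    (s.foldl (fun d e' => d.modify e' [] (fun l => l ++ [j])) d).getD e [] =
      d.getD e [] ++ (if e ∈ s then [j] else []) := by
  induction s generalizing d with
  | nil => simp
  | cons a s ih =>
    simp only [List.foldl_cons]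
    rw [ih (List.Nodup.of_cons hs), PySem.Dict.getD_modify]
    by_cases he : e = a
    · subst he
      have hns : e ∉ s := (List.nodup_cons.mp hs).1
      simp [hns]
    · simp [he, List.mem_cons]

-- inverted index: value at e collects exactly the indices whose clade contains e
theorem pv_idx_getD (clade2 : List (List String)) (l : List Int) (d : PySem.Dict String (List Int)) (e : String) :
    (l.foldl (fun idx j =>
      (PySem.Set.ofList (PySem.List.pyGetD clade2 j [])).foldl (fun idx e' =>
        idx.modify e' [] (fun l' => l' ++ [j])) idx) d).getD e [] =
      d.getD e [] ++ l.filter (fun j => decide (e ∈ PySem.List.pyGetD clade2 j [])) := by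
  induction l generalizing d with
  | nil => simp
  | cons j l ih =>
    simp only [List.foldl_cons, List.filter_cons]
    rw [ih, pv_inner_step _ (PySem.Set.nodup_ofList _)]
    by_cases hm : e ∈ PySem.List.pyGetD clade2 j []
    · simp [hm, PySem.Set.mem_ofList]
    · simp [hm, PySem.Set.mem_ofList]

-- the zero-initialised counter dict
theorem pv_cnt0_getD (l : List Int) (d : PySem.Dict Int Int) (h : ∀ j, d.getD j 0 = 0) (j : Int) :
    (l.foldl (fun d j' => d.insert j' 0) d).getD j 0 = 0 := by
  induction l generalizing d with
  | nil => exact h j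
  | cons a l ih =>
    refine ih _ (fun j' => ?_)
    rw [PySem.Dict.getD_insert]
    split <;> simp [h]

-- counter value after the counting loop
theorem pv_cnt_fold (idx : PySem.Dict String (List Int)) (s : List String) (cnt : PySem.Dict Int Int) (j : Int) :
    (s.foldl (fun cnt e => (idx.getD e []).foldl (fun c j' => c.modify j' 0 (fun v => v + 1)) cnt) cnt).getD j 0 =
      cnt.getD j 0 + ((s.map (fun e => ((idx.getD e []).count j : Int))).sum) := by
  induction s generalizing cnt with
  | nil => simp
  | cons e s ih =>
    simp only [List.foldl_cons, List.map_cons, List.sum_cons]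
    rw [ih, PySem.Dict.getD_foldl_modify_add_one]
    ring

theorem pv_set_update_of_subset {α : Type} [BEq α] [LawfulBEq α] (s : PySem.Set α) (xs : List α)
    (h : ∀ x ∈ xs, x ∈ s) : PySem.Set.update s xs = s := by
  unfold PySem.Set.update
  induction xs generalizing s with
  | nil => rfl
  | cons x xs ih =>
    rw [List.foldl_cons, PySem.Set.add_of_mem (h x (by simp))]
    exact ih s (fun y hy => h y (by simp [hy]))

-- the counting loop only touches existing keys
theorem pv_cnt_keys (idx : PySem.Dict String (List Int)) (s : List String) (cnt : PySem.Dict Int Int)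
    (h : ∀ e, ∀ j ∈ idx.getD e [], j ∈ cnt.keys) :
    (s.foldl (fun cnt e => (idx.getD e []).foldl (fun c j' => c.modify j' 0 (fun v => v + 1)) cnt) cnt).keys = cnt.keys := by
  induction s generalizing cnt with
  | nil => rfl
  | cons e s ih =>
    simp only [List.foldl_cons]
    have hk : ((idx.getD e []).foldl (fun c j' => c.modify j' 0 (fun v => v + 1)) cnt).keys = cnt.keys := by
      rw [PySem.Dict.keys_foldl_modify]
      exact pv_set_update_of_subset _ _ (h e)
    rw [ih _ (fun e' j hj => by rw [hk]; exact h e' j hj), hk]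

theorem pv_bool_reorder (x y : Int) (b : Bool) : (b && decide (y ≥ x)) = (!decide (x > y) && b) := by
  by_cases h : x ≤ y
  · simp [ge_iff_le, gt_iff_lt, h, not_lt.mpr h, Bool.and_comm]
  · simp [ge_iff_le, gt_iff_lt, h, not_le.mp h]

def pvIdx (clade2 : List (List String)) : PySem.Dict String (List Int) :=
  (PySem.List.pyRange 0 (PySem.List.len clade2) 1).foldl (fun idx j =>
    (PySem.Set.ofList (PySem.List.pyGetD clade2 j [])).foldl (fun idx e =>
      idx.modify e [] (fun l => l ++ [j])) idx) PySem.Dict.empty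

def pvCnt0 (clade2 : List (List String)) : PySem.Dict Int Int :=
  (PySem.List.pyRange 0 (PySem.List.len clade2) 1).foldl (fun d j => d.insert j 0) PySem.Dict.empty

def pvCnt (clade2 : List (List String)) (c1 : List String) : PySem.Dict Int Int :=
  (PySem.Set.ofList c1).foldl (fun cnt e =>
    ((pvIdx clade2).getD e []).foldl (fun cnt j => cnt.modify j 0 (fun v => v + 1)) cnt) (pvCnt0 clade2)

theorem pv_cov_any (clade2 : List (List String)) (c1 : List String) :
    (pvCnt clade2 c1).keys.any (fun j =>
      ((pvCnt clade2 c1).getD j 0 == PySem.List.len c1) &&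
      decide (PySem.List.len (PySem.List.pyGetD clade2 j []) ≥ PySem.List.len c1))
    = pvCovered clade2 c1 := by
  have h_idx : ∀ e, (pvIdx clade2).getD e [] =
      (PySem.List.pyRange 0 (PySem.List.len clade2) 1).filter (fun j => decide (e ∈ PySem.List.pyGetD clade2 j [])) := by
    intro e
    unfold pvIdx
    rw [pv_idx_getD clade2 _ PySem.Dict.empty e]
    simp
  have hkeys0 : (pvCnt0 clade2).keys = PySem.List.pyRange 0 (PySem.List.len clade2) 1 := by
    unfold pvCnt0
    rw [PySem.Dict.keys_foldl_insert, PySem.Dict.keys_empty]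
    have h1 : PySem.Set.update ([] : List Int) (PySem.List.pyRange 0 (PySem.List.len clade2) 1)
        = PySem.Set.ofList (PySem.List.pyRange 0 (PySem.List.len clade2) 1) := rfl
    rw [h1, PySem.Set.ofList_eq_self_of_nodup _ (PySem.List.nodup_pyRange_one 0 _)]
  have hkeys : (pvCnt clade2 c1).keys = PySem.List.pyRange 0 (PySem.List.len clade2) 1 := by
    unfold pvCnt
    rw [pv_cnt_keys _ _ _ (fun e j hj => by
      rw [hkeys0]
      rw [h_idx] at hj
      exact (List.mem_filter.mp hj).1), hkeys0]
  have hget : ∀ j ∈ PySem.List.pyRange 0 (PySem.List.len clade2) 1, (pvCnt clade2 c1).getD j 0 =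
      PySem.Set.len (PySem.Set.inter (PySem.Set.ofList c1) (PySem.Set.ofList (PySem.List.pyGetD clade2 j []))) := by
    intro j hj
    unfold pvCnt
    rw [pv_cnt_fold]
    have h0 : (pvCnt0 clade2).getD j 0 = 0 := pv_cnt0_getD _ _ (fun j' => PySem.Dict.getD_empty j' 0) j
    rw [h0]
    have hterm : ∀ e ∈ PySem.Set.ofList c1, (((pvIdx clade2).getD e []).count j : Int) =
        (fun e => if decide (e ∈ PySem.List.pyGetD clade2 j []) then (1:Int) else 0) e := by
      intro e _
      rw [h_idx]
      by_cases hm : e ∈ PySem.List.pyGetD clade2 j []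
      · rw [List.count_filter (by simp [hm]),
          List.count_eq_one_of_mem (PySem.List.nodup_pyRange_one 0 _) hj]
        simp [hm]
      · rw [List.count_eq_zero_of_not_mem (fun hc => hm (by simpa using (List.mem_filter.mp hc).2))]
        simp [hm]
    rw [List.map_congr_left hterm, PySem.List.sum_map_ite_one_zero]
    show (0:Int) + _ = _
    rw [zero_add]
    unfold PySem.Set.len PySem.Set.inter
    rw [List.countP_eq_length_filter]
    congr 1
    refine congrArg List.length (List.filter_congr ?_)
    intro x _
    simp [PySem.Set.mem_ofList]
  rw [hkeys]
  unfold pvCovered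
  apply pv_any_congr_mem
  intro j hj
  rw [hget j hj]
  exact pv_bool_reorder _ _ _

theorem pv_subclade_alt_eq_filter (all_clade clade2 : List (List String)) :
    subclade_alt all_clade clade2 =
      (PySem.List.pyRange 0 (PySem.List.len all_clade) 1).filter
        (fun i => !pvCovered clade2 (PySem.List.pyGetD all_clade i [])) := by
  unfold subclade_alt
  have hfun : (fun (res : List Int) (i : Int) =>
      if (pvCnt clade2 (PySem.List.pyGetD all_clade i [])).keys.any (fun j =>
          ((pvCnt clade2 (PySem.List.pyGetD all_clade i [])).getD j 0 == PySem.List.len (PySem.List.pyGetD all_clade i [])) &&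
          decide (PySem.List.len (PySem.List.pyGetD clade2 j []) ≥ PySem.List.len (PySem.List.pyGetD all_clade i []))) then res
      else res ++ [i])
      = (fun res i => if (fun i => !pvCovered clade2 (PySem.List.pyGetD all_clade i [])) i then res ++ [i] else res) := by
    funext res i
    rw [pv_cov_any]
    cases h : pvCovered clade2 (PySem.List.pyGetD all_clade i []) <;> simp [h]
  show (PySem.List.pyRange 0 (PySem.List.len all_clade) 1).foldl (fun (res : List Int) (i : Int) =>
      if (pvCnt clade2 (PySem.List.pyGetD all_clade i [])).keys.any (fun j =>
          ((pvCnt clade2 (PySem.List.pyGetD all_clade i [])).getD j 0 == PySem.List.len (PySem.List.pyGetD all_clade i [])) &&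
          decide (PySem.List.len (PySem.List.pyGetD clade2 j []) ≥ PySem.List.len (PySem.List.pyGetD all_clade i []))) then res
      else res ++ [i]) [] = _
  rw [hfun]
  have h2 := PySem.List.foldl_append_if (fun i => !pvCovered clade2 (PySem.List.pyGetD all_clade i []))
      (fun i : Int => i) (PySem.List.pyRange 0 (PySem.List.len all_clade) 1) []
  simpa using h2

-- ===== VERDICT (by name: the statement is the Claim_ definition above) =====
theorem subclade_spec : Claim_equal_subclade := by
  intro all_clade clade2 _
  unfold Spec_subclade
  rw [pv_subclade_eq_filter, pv_subclade_alt_eq_filter]
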